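-- pv_equiv track=rewrite | github.com/Tragoedie/on_server_learning | UFO.py | UFO
-- ===== SOURCE A (Python) =====
-- def UFO(N, data, octal):
--     work_massive = []
--     for i in range(N):
--         work_sum = 0
--         number = data[i]
--         exponent = 0
--         while number > 0:
--             work_number = number % 10
--             if octal is True:
--                 work_number = (work_number * pow(8, exponent))
--             else:
--                 work_number = (work_number * pow(16, exponent))
--             work_sum += work_number
--             number = number // 10
--             exponent += 1
--         work_massive.append(work_sum)
--     return work_massive
-- ===== SOURCE B (Python) =====
-- def UFO(N, data, octal):
--     base = 8 if octal is True else 16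
--     def conv(n):
--         if n <= 0:
--             return 0
--         return conv(n // 10) * base + n % 10
--     return [conv(data[i]) for i in range(N)]
-- ===== Notes on version B (the rewrite author's own statement) =====
-- stated objective: simpler
-- what changed: Replaces the while loop with explicit exponent/pow bookkeeping by a most-significant-digit-first Horner recursion (acc = acc*base + digit) and a list comprehension instead of append accumulation.
import Mathlib
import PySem

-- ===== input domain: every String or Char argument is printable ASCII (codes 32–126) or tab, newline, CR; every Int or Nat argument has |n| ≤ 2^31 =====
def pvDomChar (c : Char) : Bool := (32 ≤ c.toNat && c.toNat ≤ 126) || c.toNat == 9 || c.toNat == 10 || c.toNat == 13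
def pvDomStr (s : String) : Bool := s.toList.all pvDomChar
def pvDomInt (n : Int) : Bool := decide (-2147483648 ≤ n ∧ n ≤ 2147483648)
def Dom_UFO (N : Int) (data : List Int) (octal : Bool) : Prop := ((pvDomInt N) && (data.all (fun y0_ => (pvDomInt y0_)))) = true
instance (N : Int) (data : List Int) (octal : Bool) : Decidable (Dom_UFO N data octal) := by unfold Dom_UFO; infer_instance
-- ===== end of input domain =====

-- B replaces A's pow/exponent while loop by a Horner recursion; objective: simpler.

-- ===== PORT A =====
-- the inner 'while number > 0' loop of A, carrying (number, exponent, work_sum)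
def UFOWhile (octal : Bool) (number : Int) (exponent : Nat) (work_sum : Int) : Int :=
  if h : number > 0 then
    let work_number := PySem.Int.mod number 10
    let work_number := if octal then work_number * 8 ^ exponent else work_number * 16 ^ exponent
    UFOWhile octal (PySem.Int.floordiv number 10) (exponent + 1) (work_sum + work_number)
  else
    work_sum
termination_by number.toNat
decreasing_by
  have : PySem.Int.floordiv number 10 = number / 10 := PySem.Int.floordiv_eq_ediv_of_pos (by omega)
  rw [this]; omega

def UFO (N : Int) (data : List Int) (octal : Bool) : List Int :=
  (PySem.List.pyRange 0 N 1).foldl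
    (fun work_massive i =>
      work_massive ++ [UFOWhile octal ((PySem.List.pyGet? data i).getD 0) 0 0]) []

-- ===== PORT B =====
-- Horner recursion: conv n = conv (n // 10) * base + n % 10 for n > 0, else 0
def UFOConv (base : Int) (n : Int) : Int :=
  if h : n ≤ 0 then 0
  else UFOConv base (PySem.Int.floordiv n 10) * base + PySem.Int.mod n 10
termination_by n.toNat
decreasing_by
  have : PySem.Int.floordiv n 10 = n / 10 := PySem.Int.floordiv_eq_ediv_of_pos (by omega)
  rw [this]; omega

def UFO_alt (N : Int) (data : List Int) (octal : Bool) : List Int :=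
  let base : Int := if octal then 8 else 16
  (PySem.List.pyRange 0 N 1).map (fun i => UFOConv base ((PySem.List.pyGet? data i).getD 0))

-- ===== PRECONDITION & SPEC =====
-- Pre_ excludes exactly the inputs where data[i] raises IndexError in A (N > len(data)).
def Pre_UFO (N : Int) (data : List Int) (octal : Bool) : Prop := N ≤ (data.length : Int)
instance (N : Int) (data : List Int) (octal : Bool) : Decidable (Pre_UFO N data octal) := by unfold Pre_UFO; infer_instance
def pvWitness_UFO : Int × List Int × Bool := (3, [90, 0, -5], true)

def Spec_UFO (N : Int) (data : List Int) (octal : Bool) (out : List Int) : Prop := out = UFO_alt N data octal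
instance (N : Int) (data : List Int) (octal : Bool) (out : List Int) : Decidable (Spec_UFO N data octal out) := by unfold Spec_UFO; infer_instance

-- ===== CLAIM (what is proved, stated in full; the proofs are below) =====
def Claim_equal_UFO : Prop := ∀ (N : Int) (data : List Int) (octal : Bool), Dom_UFO N data octal → Pre_UFO N data octal → Spec_UFO N data octal (UFO N data octal)

-- ===== LEMMAS AND PROOFS =====

-- loop invariant: A's while loop computes work_sum + base^exponent * Horner(number)
theorem UFOWhile_eq_conv (octal : Bool) :
    ∀ (number : Int) (exponent : Nat) (work_sum : Int),
      UFOWhile octal number exponent work_sum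
        = work_sum + (if octal then (8:Int) else 16) ^ exponent * UFOConv (if octal then 8 else 16) number := by
  have key : ∀ (k : Nat) (number : Int), number.toNat ≤ k → ∀ (e : Nat) (s : Int),
      UFOWhile octal number e s
        = s + (if octal then (8:Int) else 16) ^ e * UFOConv (if octal then 8 else 16) number := by
    intro k
    induction k with
    | zero =>
      intro n hn e s
      rw [UFOWhile, UFOConv]
      simp [show ¬ n > 0 by omega, show n ≤ 0 by omega]
    | succ k ih =>
      intro n hn e s
      by_cases hp : n > 0
      · rw [UFOWhile, UFOConv]
        simp only [hp, dite_true, show ¬ n ≤ 0 by omega, dite_false]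
        have hd : PySem.Int.floordiv n 10 = n / 10 := PySem.Int.floordiv_eq_ediv_of_pos (by omega)
        have hle : (n / 10).toNat ≤ k := by omega
        rw [hd, ih (n / 10) hle (e + 1) _]
        have hm : PySem.Int.mod n 10 = n % 10 := PySem.Int.mod_eq_emod_of_pos (by omega)
        rw [hm]
        cases octal <;> simp [pow_succ] <;> ring
      · rw [UFOWhile, UFOConv]
        simp [hp, show n ≤ 0 by omega]
  intro number
  exact key number.toNat number le_rfl

theorem foldl_append_map {α β : Type} (f : α → β) :
    ∀ (l : List α) (acc : List β),
      l.foldl (fun a i => a ++ [f i]) acc = acc ++ l.map f := by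
  intro l
  induction l with
  | nil => simp
  | cons x xs ih => intro acc; simp [List.foldl, ih]

-- ===== VERDICT (by name: the statement is the Claim_ definition above) =====
theorem UFO_spec : Claim_equal_UFO := by
  intro N data octal _ _
  unfold Spec_UFO UFO UFO_alt
  rw [foldl_append_map]
  simp only [List.nil_append]
  apply List.map_congr_left
  intro i _
  rw [UFOWhile_eq_conv]
  simp
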